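-- pv_equiv track=rewrite | github.com/CheraHamza/Inference-engine | avant.py | select_rules
-- ===== SOURCE A (Python) =====
-- def select_rules(applicable_rules):
--     selected_rules = []
--     if len(applicable_rules) < 1:
--         return selected_rules
--     premise_count = len(applicable_rules[0][1])
--     for rule in applicable_rules:
--         if len(rule[1]) > premise_count:
--             selected_rules.clear()
--         else:
--             if len(rule[1]) < premise_count:
--                 continue
--         premise_count = len(rule[1])
--         selected_rules.append(rule)
--
--     return selected_rules
-- ===== SOURCE B (Python) =====
-- def select_rules(applicable_rules):
--     if not applicable_rules:
--         return []
--     max_count = max(len(r[1]) for r in applicable_rules)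
--     return [r for r in applicable_rules if len(r[1]) == max_count]
-- ===== Notes on version B (the rewrite author's own statement) =====
-- stated objective: simpler
-- what changed: Replaced A's single pass maintaining a running max with clear-and-restart of the accumulator by two plain passes: compute the maximum premise count, then filter the rules with that count.
import Mathlib
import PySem

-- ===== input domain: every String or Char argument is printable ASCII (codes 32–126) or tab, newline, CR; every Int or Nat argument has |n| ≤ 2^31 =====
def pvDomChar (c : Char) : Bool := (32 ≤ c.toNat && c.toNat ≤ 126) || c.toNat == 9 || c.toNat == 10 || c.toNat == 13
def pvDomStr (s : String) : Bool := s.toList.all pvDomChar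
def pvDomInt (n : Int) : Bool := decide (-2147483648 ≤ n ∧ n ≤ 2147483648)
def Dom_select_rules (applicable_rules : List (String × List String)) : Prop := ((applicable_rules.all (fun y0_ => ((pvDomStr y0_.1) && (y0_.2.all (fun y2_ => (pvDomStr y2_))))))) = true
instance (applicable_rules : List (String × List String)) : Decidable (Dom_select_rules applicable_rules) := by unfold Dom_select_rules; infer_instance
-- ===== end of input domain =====

-- B replaces A's single-pass running-max-with-clear accumulator by two passes (find the max premise count, then filter); simpler, same O(n) cost.


-- ===== PORT A =====
-- the for-loop of A: state is (premise_count, selected_rules)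
def selectLoop (rules : List (String × List String)) (pc : Nat)
    (sel : List (String × List String)) : List (String × List String) :=
  match rules with
  | [] => sel
  | r :: rest =>
    if r.2.length > pc then
      -- selected_rules.clear(); premise_count = len(rule[1]); append(rule)
      selectLoop rest r.2.length [r]
    else if r.2.length < pc then
      -- continue
      selectLoop rest pc sel
    else
      -- premise_count = len(rule[1]) (unchanged); append(rule)
      selectLoop rest r.2.length (sel ++ [r])

def select_rules (applicable_rules : List (String × List String)) : List (String × List String) :=
  if applicable_rules.length < 1 then []
  else
    match applicable_rules with
    | [] => []
    | h :: _ => selectLoop applicable_rules h.2.length []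

-- ===== PORT B =====
def select_rules_alt (applicable_rules : List (String × List String)) : List (String × List String) :=
  match applicable_rules with
  | [] => []
  | h :: t =>
    -- max(len(r[1]) for r in applicable_rules): fold of max over the lengths
    let max_count := t.foldl (fun a r => Nat.max a r.2.length) h.2.length
    applicable_rules.filter (fun r => r.2.length == max_count)

-- ===== PRECONDITION & SPEC =====
def Spec_select_rules (applicable_rules : List (String × List String)) (out : List (String × List String)) : Prop := out = select_rules_alt applicable_rules
instance (applicable_rules : List (String × List String)) (out : List (String × List String)) : Decidable (Spec_select_rules applicable_rules out) := by unfold Spec_select_rules; infer_instance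

-- ===== CLAIM (what is proved, stated in full; the proofs are below) =====
def Claim_equal_select_rules : Prop := ∀ (applicable_rules : List (String × List String)), Dom_select_rules applicable_rules → Spec_select_rules applicable_rules (select_rules applicable_rules)

-- ===== LEMMAS AND PROOFS =====

-- Invariant of A's loop: with running max pc and accumulator sel, the result is
-- sel (kept iff pc reaches the overall max) followed by the rules of maximal length.
-- the seed is a lower bound of the running max over the premise counts
theorem le_foldl_max_len (rest : List (String × List String)) (p : Nat) :
    p ≤ rest.foldl (fun a r => Nat.max a r.2.length) p := by
  induction rest generalizing p with
  | nil => simp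
  | cons x xs ihx =>
    simp only [List.foldl_cons]
    exact le_trans (Nat.le_max_left _ _) (ihx _)

-- Invariant of A's loop: with running max pc and accumulator sel, the result is
-- sel (kept iff pc reaches the overall max) followed by the rules of maximal length.
theorem selectLoop_eq (rules : List (String × List String)) :
    ∀ (pc : Nat) (sel : List (String × List String)),
    selectLoop rules pc sel =
      (if pc = rules.foldl (fun a r => Nat.max a r.2.length) pc then sel else []) ++
        rules.filter (fun r => r.2.length == rules.foldl (fun a r => Nat.max a r.2.length) pc) := by
  induction rules with
  | nil => intro pc sel; simp [selectLoop]
  | cons r rest ih =>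
    intro pc sel
    simp only [selectLoop, List.foldl_cons, List.filter_cons]
    rcases Nat.lt_trichotomy r.2.length pc with hlt | heq | hgt
    · -- len < pc : continue
      have hmax : Nat.max pc r.2.length = pc := Nat.max_eq_left (le_of_lt hlt)
      have h1 : ¬ (r.2.length > pc) := by omega
      rw [if_neg h1, if_pos hlt, ih]
      simp only [hmax]
      have hf : (r.2.length == rest.foldl (fun a r => Nat.max a r.2.length) pc) = false :=
        beq_eq_false_iff_ne.mpr (by have := le_foldl_max_len rest pc; omega)
      simp [hf]
    · -- len = pc : append
      have h1 : ¬ (r.2.length > pc) := by omega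
      have h2 : ¬ (r.2.length < pc) := by omega
      rw [if_neg h1, if_neg h2, ih]
      simp only [heq, Nat.max_self]
      by_cases h : pc = rest.foldl (fun a r => Nat.max a r.2.length) pc
      · have hb : (pc == rest.foldl (fun a r => Nat.max a r.2.length) pc) = true := beq_iff_eq.mpr h
        rw [if_pos h, if_pos h]
        simp [hb]
      · have hb : (pc == rest.foldl (fun a r => Nat.max a r.2.length) pc) = false := beq_eq_false_iff_ne.mpr h
        rw [if_neg h, if_neg h]
        simp [hb]
    · -- len > pc : clear and restart
      have hmax : Nat.max pc r.2.length = r.2.length := Nat.max_eq_right (le_of_lt hgt)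
      rw [if_pos hgt, ih]
      simp only [hmax]
      have hne : pc ≠ rest.foldl (fun a r => Nat.max a r.2.length) r.2.length := by
        have := le_foldl_max_len rest r.2.length; omega
      rw [if_neg hne]
      by_cases h : r.2.length = rest.foldl (fun a r => Nat.max a r.2.length) r.2.length
      · have hb : (r.2.length == rest.foldl (fun a r => Nat.max a r.2.length) r.2.length) = true := beq_iff_eq.mpr h
        rw [if_pos h]
        simp [hb]
      · have hb : (r.2.length == rest.foldl (fun a r => Nat.max a r.2.length) r.2.length) = false := beq_eq_false_iff_ne.mpr h
        rw [if_neg h]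
        simp [hb]

-- ===== VERDICT (by name: the statement is the Claim_ definition above) =====
theorem select_rules_spec : Claim_equal_select_rules := by
  intro applicable_rules _
  unfold Spec_select_rules select_rules select_rules_alt
  match applicable_rules with
  | [] => rfl
  | h :: t =>
    simp only [List.length_cons]
    rw [if_neg (by omega)]
    rw [selectLoop_eq (h :: t) h.2.length []]
    simp only [List.foldl_cons, Nat.max_self]
    simp
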